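-- pv_equiv track=rewrite | github.com/Danyal-Faheem/AuditLoop | src/static_check.py | __order_first_b
-- ===== SOURCE A (Python) =====
-- from typing import List
--
-- def __order_first_b(a:List[str], b:List[str], text):
--     # make sure that all a happens after b in text
--     # a: change balance
--     # b: change interest, a should happen after b
--
--     # if any is empty, return false
--     if len(a) == 0 or len(b) == 0:
--         return False
--
--     # if a and b point to the same statement, return false
--     if len(a) == 1 and len(b) == 1:
--         stmt_a = a[0]
--         stmt_b = b[0]
--         if stmt_a in stmt_b or stmt_b in stmt_a:
--             return False
--
--     # if a or b are not in the text, return false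
--     text_has_a_flag = False
--     text_has_b_flag = False
--
--     for a_var in a:
--         if a_var in text:
--             text_has_a_flag = True
--             break
--     for b_var in b:
--         if b_var in text:
--             text_has_b_flag = True
--             break
--     if not text_has_a_flag or not text_has_b_flag:
--         return False
--
--     # if exist a happens before b, return false
--     for a_var in a:
--         for b_var in b:
--             if a_var in text and b_var in text:
--                 try:
--                     if text.index(a_var) < text.index(b_var):
--                         return True
--                 except:
--                     continue
--
--     # if all a happens after b, return true
--     return False
-- ===== SOURCE B (Python) =====
-- from typing import List
--
-- def __order_first_b(a: List[str], b: List[str], text):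
--     # one pass per list: collect first-occurrence indices, then compare
--     # the earliest a-occurrence with the latest b-occurrence
--     if not a or not b:
--         return False
--     if len(a) == 1 and len(b) == 1 and (a[0] in b[0] or b[0] in a[0]):
--         return False
--     a_hits = [i for i in (text.find(s) for s in a) if i >= 0]
--     b_hits = [i for i in (text.find(s) for s in b) if i >= 0]
--     if not a_hits or not b_hits:
--         return False
--     return min(a_hits) < max(b_hits)
-- ===== Notes on version B (the rewrite author's own statement) =====
-- stated objective: alternative
-- what changed: Replaces A's nested a-by-b pair scan with repeated text.index calls by one text.find per element, keeping only the hit indices, and a single min(a-hits) < max(b-hits) comparison.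
import Mathlib
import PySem

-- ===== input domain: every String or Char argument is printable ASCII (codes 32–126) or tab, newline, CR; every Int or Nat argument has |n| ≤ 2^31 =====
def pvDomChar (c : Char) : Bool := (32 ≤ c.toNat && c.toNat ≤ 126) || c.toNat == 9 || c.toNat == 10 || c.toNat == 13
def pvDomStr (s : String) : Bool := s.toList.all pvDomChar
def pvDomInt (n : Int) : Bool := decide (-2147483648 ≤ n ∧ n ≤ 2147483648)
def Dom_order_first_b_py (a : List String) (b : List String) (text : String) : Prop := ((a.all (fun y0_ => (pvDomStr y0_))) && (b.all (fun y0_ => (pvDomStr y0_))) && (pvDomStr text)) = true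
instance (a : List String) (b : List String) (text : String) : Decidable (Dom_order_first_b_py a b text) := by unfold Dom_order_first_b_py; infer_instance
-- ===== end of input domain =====

-- B replaces A's nested a-by-b pair scan (repeated text.index calls) by one
-- text.find per element plus a min/max comparison; return-value equivalence is proved.

-- ===== PORT A =====
-- 'for x in xs: if x in text: flag = True; break'
def pvHasHit (xs : List String) (text : String) : Bool :=
  match xs with
  | [] => false
  | x :: t => if PySem.Str.isIn x text then true else pvHasHit t text

-- inner 'for b_var in b' of A's final nested loop; the guard checks membership
-- first, so text.index never raises here and equals text.find (A's except: is dead)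
def pvBLoop (av : String) (bs : List String) (text : String) : Bool :=
  match bs with
  | [] => false
  | bv :: t =>
      if (PySem.Str.isIn av text && PySem.Str.isIn bv text) &&
         decide (PySem.Str.find text av < PySem.Str.find text bv) then true
      else pvBLoop av t text

-- outer 'for a_var in a'
def pvALoop (as_ bs : List String) (text : String) : Bool :=
  match as_ with
  | [] => false
  | av :: t => if pvBLoop av bs text then true else pvALoop t bs text

def order_first_b_py (a : List String) (b : List String) (text : String) : Bool :=
  if a.length == 0 || b.length == 0 then false
  else if a.length == 1 && b.length == 1 &&
      (PySem.Str.isIn (a.headD "") (b.headD "") || PySem.Str.isIn (b.headD "") (a.headD "")) then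
    false
  else
    let textHasA := pvHasHit a text
    let textHasB := pvHasHit b text
    if !textHasA || !textHasB then false
    else pvALoop a b text

-- ===== PORT B =====
def order_first_b_py_alt (a : List String) (b : List String) (text : String) : Bool :=
  if a.isEmpty || b.isEmpty then false
  else if a.length == 1 && b.length == 1 &&
      (PySem.Str.isIn (a.headD "") (b.headD "") || PySem.Str.isIn (b.headD "") (a.headD "")) then
    false
  else
    let aHits := (a.map (fun s => PySem.Str.find text s)).filter (fun i => decide (0 ≤ i))
    let bHits := (b.map (fun s => PySem.Str.find text s)).filter (fun i => decide (0 ≤ i))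
    if aHits.isEmpty || bHits.isEmpty then false
    else
      match PySem.List.min? aHits (fun x => x), PySem.List.max? bHits (fun x => x) with
      | some m, some M => decide (m < M)
      | _, _ => false

-- ===== PRECONDITION & SPEC =====
def Spec_order_first_b_py (a : List String) (b : List String) (text : String) (out : Bool) : Prop := out = order_first_b_py_alt a b text
instance (a : List String) (b : List String) (text : String) (out : Bool) : Decidable (Spec_order_first_b_py a b text out) := by unfold Spec_order_first_b_py; infer_instance

-- ===== CLAIM (what is proved, stated in full; the proofs are below) =====
def Claim_equal_order_first_b_py : Prop := ∀ (a : List String) (b : List String) (text : String), Dom_order_first_b_py a b text → Spec_order_first_b_py a b text (order_first_b_py a b text)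

-- ===== LEMMAS AND PROOFS =====

theorem chars_isIn_iff (s text : String) :
    PySem.Chars.isIn s.toList text.toList = true ↔
      0 ≤ PySem.Chars.find text.toList s.toList := by
  rw [PySem.Chars.isIn_iff_infix, ← PySem.Chars.find_nonneg_iff]

theorem pvHasHit_iff (xs : List String) (text : String) :
    pvHasHit xs text = true ↔ ∃ s ∈ xs, 0 ≤ PySem.Chars.find text.toList s.toList := by
  induction xs with
  | nil => simp [pvHasHit]
  | cons x t ih =>
      simp only [pvHasHit]
      by_cases hx : PySem.Str.isIn x text = true
      · have hpos := (chars_isIn_iff x text).mp (by simpa using hx)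
        rw [if_pos hx]
        simp [hpos]
      · have hneg : ¬ 0 ≤ PySem.Chars.find text.toList x.toList := fun hle =>
          hx (by simpa using (chars_isIn_iff x text).mpr hle)
        rw [if_neg hx, ih]
        simp [hneg]

theorem pvBLoop_iff (av : String) (bs : List String) (text : String) :
    pvBLoop av bs text = true ↔ ∃ bv ∈ bs,
      (0 ≤ PySem.Chars.find text.toList av.toList ∧
       0 ≤ PySem.Chars.find text.toList bv.toList) ∧
      PySem.Chars.find text.toList av.toList < PySem.Chars.find text.toList bv.toList := by
  induction bs with
  | nil => simp [pvBLoop]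
  | cons bv t ih =>
      simp only [pvBLoop]
      have hcond : ((PySem.Str.isIn av text && PySem.Str.isIn bv text) &&
          decide (PySem.Str.find text av < PySem.Str.find text bv)) = true ↔
          ((0 ≤ PySem.Chars.find text.toList av.toList ∧
            0 ≤ PySem.Chars.find text.toList bv.toList) ∧
           PySem.Chars.find text.toList av.toList < PySem.Chars.find text.toList bv.toList) := by
        simp [chars_isIn_iff, and_assoc]
      by_cases hP : ((0 ≤ PySem.Chars.find text.toList av.toList ∧
            0 ≤ PySem.Chars.find text.toList bv.toList) ∧
           PySem.Chars.find text.toList av.toList < PySem.Chars.find text.toList bv.toList)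
      · rw [if_pos (hcond.mpr hP)]
        simp [hP.1.1, hP.1.2, hP.2]
      · rw [if_neg (fun h => hP (hcond.mp h)), ih]
        simp [hP]

theorem pvALoop_iff (as_ bs : List String) (text : String) :
    pvALoop as_ bs text = true ↔ ∃ av ∈ as_, ∃ bv ∈ bs,
      (0 ≤ PySem.Chars.find text.toList av.toList ∧
       0 ≤ PySem.Chars.find text.toList bv.toList) ∧
      PySem.Chars.find text.toList av.toList < PySem.Chars.find text.toList bv.toList := by
  induction as_ with
  | nil => simp [pvALoop]
  | cons av t ih =>
      simp only [pvALoop]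
      by_cases h : pvBLoop av bs text = true
      · rw [if_pos h]
        have := (pvBLoop_iff av bs text).mp h
        simp [this]
      · rw [if_neg h, ih]
        have hno := fun hx => h ((pvBLoop_iff av bs text).mpr hx)
        constructor
        · rintro ⟨av', h1, rest⟩
          exact ⟨av', List.mem_cons_of_mem _ h1, rest⟩
        · rintro ⟨av', hmem, bv', hbv, hc⟩
          rcases List.mem_cons.mp hmem with rfl | hmem'
          · exact absurd ⟨bv', hbv, hc⟩ hno
          · exact ⟨av', hmem', bv', hbv, hc⟩

theorem mem_hits_iff (xs : List String) (text : String) (i : Int) :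
    i ∈ (xs.map (fun s => PySem.Str.find text s)).filter (fun i => decide (0 ≤ i)) ↔
      (∃ s ∈ xs, PySem.Chars.find text.toList s.toList = i) ∧ 0 ≤ i := by
  simp only [List.mem_filter, List.mem_map, decide_eq_true_eq, PySem.Str.find_eq]

theorem hits_ne_nil_iff (xs : List String) (text : String) :
    ((xs.map (fun s => PySem.Str.find text s)).filter (fun i => decide (0 ≤ i)) ≠ []) ↔
      ∃ s ∈ xs, 0 ≤ PySem.Chars.find text.toList s.toList := by
  rw [← List.isEmpty_eq_false_iff, List.isEmpty_eq_false_iff_exists_mem]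
  constructor
  · rintro ⟨i, hi⟩
    obtain ⟨⟨s, hs, hfs⟩, hpos⟩ := (mem_hits_iff xs text i).mp hi
    exact ⟨s, hs, by omega⟩
  · rintro ⟨s, hs, hpos⟩
    exact ⟨_, (mem_hits_iff xs text _).mpr ⟨⟨s, hs, rfl⟩, hpos⟩⟩

theorem hits_isEmpty_eq (xs : List String) (text : String) :
    ((xs.map (fun s => PySem.Str.find text s)).filter (fun i => decide (0 ≤ i))).isEmpty =
      !pvHasHit xs text := by
  rcases Bool.eq_false_or_eq_true (pvHasHit xs text) with h | h
  · rw [h]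
    have hne := (hits_ne_nil_iff xs text).mpr ((pvHasHit_iff xs text).mp h)
    show ((xs.map (fun s => PySem.Str.find text s)).filter
        (fun i => decide (0 ≤ i))).isEmpty = false
    exact List.isEmpty_eq_false_iff.mpr hne
  · rw [h]
    have hnoex : ¬ ∃ s ∈ xs, 0 ≤ PySem.Chars.find text.toList s.toList := fun hx => by
      rw [(pvHasHit_iff xs text).mpr hx] at h
      exact Bool.noConfusion h
    have hnil : (xs.map (fun s => PySem.Str.find text s)).filter
        (fun i => decide (0 ≤ i)) = [] := by
      by_contra hne
      exact hnoex ((hits_ne_nil_iff xs text).mp hne)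
    show ((xs.map (fun s => PySem.Str.find text s)).filter
        (fun i => decide (0 ≤ i))).isEmpty = true
    rw [hnil]
    rfl

-- the core: with both hit lists nonempty, A's nested scan equals min < max
theorem core_eq (a b : List String) (text : String)
    (ha : ∃ s ∈ a, 0 ≤ PySem.Chars.find text.toList s.toList)
    (hb : ∃ s ∈ b, 0 ≤ PySem.Chars.find text.toList s.toList) :
    pvALoop a b text =
      (match PySem.List.min? ((a.map (fun s => PySem.Str.find text s)).filter
              (fun i => decide (0 ≤ i))) (fun x => x),
            PySem.List.max? ((b.map (fun s => PySem.Str.find text s)).filter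
              (fun i => decide (0 ≤ i))) (fun x => x) with
      | some m, some M => decide (m < M)
      | _, _ => false) := by
  set aHits := (a.map (fun s => PySem.Str.find text s)).filter (fun i => decide (0 ≤ i)) with hA
  set bHits := (b.map (fun s => PySem.Str.find text s)).filter (fun i => decide (0 ≤ i)) with hB
  have hane : aHits ≠ [] := (hits_ne_nil_iff a text).mpr ha
  have hbne : bHits ≠ [] := (hits_ne_nil_iff b text).mpr hb
  obtain ⟨m, hm⟩ : ∃ m, PySem.List.min? aHits (fun x => x) = some m := by
    cases hmin : PySem.List.min? aHits (fun x => x) with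
    | none => exact absurd ((PySem.List.min?_eq_none_iff _ _).mp hmin) hane
    | some m => exact ⟨m, rfl⟩
  obtain ⟨M, hM⟩ : ∃ M, PySem.List.max? bHits (fun x => x) = some M := by
    cases hmax : PySem.List.max? bHits (fun x => x) with
    | none => exact absurd ((PySem.List.max?_eq_none_iff _ _).mp hmax) hbne
    | some M => exact ⟨M, rfl⟩
  rw [hm, hM]
  have hmmem := PySem.List.min?_mem hm
  have hMmem := PySem.List.max?_mem hM
  obtain ⟨⟨sa, hsa, hsae⟩, hm0⟩ := (mem_hits_iff a text m).mp hmmem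
  obtain ⟨⟨sb, hsb, hsbe⟩, hM0⟩ := (mem_hits_iff b text M).mp hMmem
  rcases Bool.eq_false_or_eq_true (pvALoop a b text) with htrue | hfalse
  · rw [htrue]
    obtain ⟨av, hav, bv, hbv, ⟨hav0, hbv0⟩, hlt⟩ := (pvALoop_iff a b text).mp htrue
    have hmle : m ≤ PySem.Chars.find text.toList av.toList :=
      PySem.List.min?_isMin hm _ ((mem_hits_iff a text _).mpr ⟨⟨av, hav, rfl⟩, hav0⟩)
    have hMge : PySem.Chars.find text.toList bv.toList ≤ M :=
      PySem.List.max?_isMax hM _ ((mem_hits_iff b text _).mpr ⟨⟨bv, hbv, rfl⟩, hbv0⟩)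
    have hlt' : m < M := by omega
    simp [hlt']
  · rw [hfalse]
    have hnot : ¬ m < M := by
      intro hlt
      have : pvALoop a b text = true := (pvALoop_iff a b text).mpr
        ⟨sa, hsa, sb, hsb, ⟨by omega, by omega⟩, by omega⟩
      rw [hfalse] at this
      exact Bool.false_ne_true this
    simp [hnot]

-- ===== VERDICT (by name: the statement is the Claim_ definition above) =====
theorem order_first_b_py_spec : Claim_equal_order_first_b_py := by
  intro a b text _hdom
  unfold Spec_order_first_b_py order_first_b_py order_first_b_py_alt
  have hg1 : (a.length == 0 || b.length == 0) = (a.isEmpty || b.isEmpty) := by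
    cases a <;> cases b <;> simp
  rw [hg1]
  by_cases h1 : (a.isEmpty || b.isEmpty) = true
  · rw [if_pos h1, if_pos h1]
  · rw [if_neg h1, if_neg h1]
    by_cases h2 : (a.length == 1 && b.length == 1 &&
        (PySem.Str.isIn (a.headD "") (b.headD "") ||
         PySem.Str.isIn (b.headD "") (a.headD ""))) = true
    · rw [if_pos h2, if_pos h2]
    · rw [if_neg h2, if_neg h2]
      simp only []
      by_cases hHA : pvHasHit a text = true
      · by_cases hHB : pvHasHit b text = true
        · have hAe : ((a.map (fun s => PySem.Str.find text s)).filter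
              (fun i => decide (0 ≤ i))).isEmpty = false := by
            rw [hits_isEmpty_eq, hHA]; rfl
          have hBe : ((b.map (fun s => PySem.Str.find text s)).filter
              (fun i => decide (0 ≤ i))).isEmpty = false := by
            rw [hits_isEmpty_eq, hHB]; rfl
          rw [if_neg (by rw [hHA, hHB]; simp), if_neg (by rw [hAe, hBe]; simp)]
          exact core_eq a b text ((pvHasHit_iff a text).mp hHA) ((pvHasHit_iff b text).mp hHB)
        · have hHB' : pvHasHit b text = false := eq_false_of_ne_true hHB
          have hBe : ((b.map (fun s => PySem.Str.find text s)).filter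
              (fun i => decide (0 ≤ i))).isEmpty = true := by
            rw [hits_isEmpty_eq, hHB']; rfl
          rw [if_pos (by rw [hHB']; simp), if_pos (by rw [hBe]; simp)]
      · have hHA' : pvHasHit a text = false := eq_false_of_ne_true hHA
        have hAe : ((a.map (fun s => PySem.Str.find text s)).filter
            (fun i => decide (0 ≤ i))).isEmpty = true := by
          rw [hits_isEmpty_eq, hHA']; rfl
        rw [if_pos (by rw [hHA']; simp), if_pos (by rw [hAe]; simp)]
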